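-- pv_equiv track=rewrite | github.com/mrosten/mbsts | poly_trade_app.py | get_outcome_indices
-- ===== SOURCE A (Python) =====
-- def get_outcome_indices(outcomes_list):
--     # Returns (up_idx, down_idx)
--     # Tries to find "Up", "Yes", "Higher" -> 0
--     # "Down", "No", "Lower" -> 1
--     # Defaults to 0, 1 if unsure
--
--     up_idx = 0
--     down_idx = 1
--
--     # Normalize
--     norm = [str(o).lower() for o in outcomes_list]
--
--     # Find UP
--     for i, name in enumerate(norm):
--         if name in ["up", "yes", "higher", "above"]:
--             up_idx = i
--             break
--
--     # Find DOWN
--     for i, name in enumerate(norm):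
--         if name in ["down", "no", "lower", "below"]:
--             down_idx = i
--             break
--
--     return up_idx, down_idx
-- ===== SOURCE B (Python) =====
-- def get_outcome_indices(outcomes_list):
--     # One pass builds a first-occurrence index table; the two answers are
--     # then keyword lookups (min index among present keywords, with defaults).
--     first = {}
--     for i, o in enumerate(outcomes_list):
--         first.setdefault(str(o).lower(), i)
--     ups = [first[k] for k in ("up", "yes", "higher", "above") if k in first]
--     downs = [first[k] for k in ("down", "no", "lower", "below") if k in first]
--     return min(ups, default=0), min(downs, default=1)
-- ===== Notes on version B (the rewrite author's own statement) =====
-- stated objective: alternative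
-- what changed: A scans the normalized list twice with break-on-first-match loops; B builds a first-occurrence index table in a single pass with dict.setdefault and then answers both questions as min-index lookups over the keyword sets, with defaults 0/1 when no keyword is present.
import Mathlib
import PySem

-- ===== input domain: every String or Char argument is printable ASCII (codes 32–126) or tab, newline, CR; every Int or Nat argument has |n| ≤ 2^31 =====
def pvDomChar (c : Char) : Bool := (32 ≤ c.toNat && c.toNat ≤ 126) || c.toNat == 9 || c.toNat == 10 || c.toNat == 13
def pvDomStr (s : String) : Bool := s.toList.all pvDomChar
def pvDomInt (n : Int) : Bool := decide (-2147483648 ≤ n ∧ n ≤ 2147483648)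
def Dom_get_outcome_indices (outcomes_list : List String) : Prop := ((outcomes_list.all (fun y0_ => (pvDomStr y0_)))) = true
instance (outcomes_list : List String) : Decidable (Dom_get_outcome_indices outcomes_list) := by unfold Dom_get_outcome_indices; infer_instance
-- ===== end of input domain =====

-- B replaces A's two break-on-first-match scans by one setdefault pass that builds a
-- first-occurrence index table plus two min-over-keywords lookups (alternative decomposition).


-- ===== PORT A =====
-- A's `for i, name in enumerate(norm): if name in [...]: idx = i; break` loop
def pvFindA (keys : List String) (dflt : Int) : List (Int × String) → Int
  | [] => dflt
  | (i, name) :: rest => if name ∈ keys then i else pvFindA keys dflt rest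

def get_outcome_indices (outcomes_list : List String) : Int × Int :=
  let norm := outcomes_list.map PySem.Str.lower
  let up_idx := pvFindA ["up", "yes", "higher", "above"] 0 (PySem.List.enumerate norm)
  let down_idx := pvFindA ["down", "no", "lower", "below"] 1 (PySem.List.enumerate norm)
  (up_idx, down_idx)

-- ===== PORT B =====
def get_outcome_indices_alt (outcomes_list : List String) : Int × Int :=
  let first := (PySem.List.enumerate outcomes_list).foldl
      (fun d p => d.setdefault (PySem.Str.lower p.2) p.1) PySem.Dict.empty
  let ups := (["up", "yes", "higher", "above"] : List String).filterMap (fun k => first.get? k)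
  let downs := (["down", "no", "lower", "below"] : List String).filterMap (fun k => first.get? k)
  (PySem.List.minD ups (fun x => x) 0, PySem.List.minD downs (fun x => x) 1)

-- ===== PRECONDITION & SPEC =====
def Spec_get_outcome_indices (outcomes_list : List String) (out : Int × Int) : Prop := out = get_outcome_indices_alt outcomes_list
instance (outcomes_list : List String) (out : Int × Int) : Decidable (Spec_get_outcome_indices outcomes_list out) := by unfold Spec_get_outcome_indices; infer_instance

-- ===== CLAIM (what is proved, stated in full; the proofs are below) =====
def Claim_equal_get_outcome_indices : Prop := ∀ (outcomes_list : List String), Dom_get_outcome_indices outcomes_list → Spec_get_outcome_indices outcomes_list (get_outcome_indices outcomes_list)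

-- ===== LEMMAS AND PROOFS =====

-- first index ≥ s at which the lowered name equals k
def pvFI (k : String) (s : Int) : List String → Option Int
  | [] => none
  | x :: t => if PySem.Str.lower x = k then some s else pvFI k (s + 1) t

def pvOmin : Option Int → Option Int → Option Int
  | none, b => b
  | some a, none => some a
  | some a, some b => some (min a b)

def pvMins (keys : List String) (l : List String) (s : Int) : Option Int :=
  keys.foldr (fun k acc => pvOmin (pvFI k s l) acc) none

theorem pvFI_ge (k : String) : ∀ (l : List String) (s v : Int), pvFI k s l = some v → s ≤ v := by
  intro l
  induction l with
  | nil => intro s v h; simp [pvFI] at h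
  | cons x t ih =>
    intro s v h
    by_cases hx : PySem.Str.lower x = k
    · simp [pvFI, hx] at h; omega
    · simp [pvFI, hx] at h
      have := ih (s + 1) v h
      omega

theorem pvMins_ge (l : List String) (s : Int) : ∀ (keys : List String) (m : Int),
    pvMins keys l s = some m → s ≤ m := by
  intro keys
  induction keys with
  | nil => intro m h; simp [pvMins] at h
  | cons k ks ih =>
    intro m h
    rw [pvMins, List.foldr_cons,
      show (ks.foldr (fun k acc => pvOmin (pvFI k s l) acc) none) = pvMins ks l s from rfl] at h
    rcases hf : pvFI k s l with _ | v <;> rcases hr : pvMins ks l s with _ | m' <;>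
      rw [hf, hr] at h <;> simp only [pvOmin, Option.some.injEq, reduceCtorEq] at h
    · exact h ▸ ih m' hr
    · exact h ▸ pvFI_ge k l s v hf
    · have h1 := pvFI_ge k l s v hf
      have h2 := ih m' hr
      rw [← h]
      exact le_min h1 h2

theorem pvMins_nil (keys : List String) (s : Int) : pvMins keys [] s = none := by
  induction keys with
  | nil => rfl
  | cons k ks ih =>
    rw [pvMins, List.foldr_cons,
      show (ks.foldr (fun k acc => pvOmin (pvFI k s []) acc) none) = pvMins ks [] s from rfl,
      ih, show pvFI k s [] = none from rfl]
    rfl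

-- head matched: mins is exactly s
theorem pvMins_cons_mem (x : String) (t : List String) (s : Int) :
    ∀ (keys : List String), PySem.Str.lower x ∈ keys → pvMins keys (x :: t) s = some s := by
  intro keys
  induction keys with
  | nil => intro h; simp at h
  | cons k ks ih =>
    intro h
    simp only [pvMins, List.foldr_cons]
    by_cases hk : PySem.Str.lower x = k
    · have hfi : pvFI k s (x :: t) = some s := by simp [pvFI, hk]
      rw [hfi]
      rcases hr : (ks.foldr (fun k acc => pvOmin (pvFI k s (x :: t)) acc) none) with _ | m
      · rfl
      · have hm : s ≤ m := pvMins_ge (x :: t) s ks m (by simp [pvMins, hr])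
        simp [pvOmin, min_eq_left hm]
    · have hmem : PySem.Str.lower x ∈ ks := by
        rcases List.mem_cons.mp h with h1 | h1
        · exact absurd h1 hk
        · exact h1
      have hr : (ks.foldr (fun k acc => pvOmin (pvFI k s (x :: t)) acc) none) = some s := by
        simpa [pvMins] using ih hmem
      rw [hr]
      rcases hf : pvFI k s (x :: t) with _ | v
      · rfl
      · have hv : s ≤ v := pvFI_ge k (x :: t) s v hf
        simp [pvOmin, min_eq_right hv]

-- head not matched: shift the start
theorem pvMins_cons_not_mem (x : String) (t : List String) (s : Int) :
    ∀ (keys : List String), PySem.Str.lower x ∉ keys →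
      pvMins keys (x :: t) s = pvMins keys t (s + 1) := by
  intro keys
  induction keys with
  | nil => intro _; rfl
  | cons k ks ih =>
    intro h
    have hk : PySem.Str.lower x ≠ k := fun he => h (he ▸ List.mem_cons_self)
    have hks : PySem.Str.lower x ∉ ks := fun hm => h (List.mem_cons_of_mem _ hm)
    simp only [pvMins, List.foldr_cons]
    have hfi : pvFI k s (x :: t) = pvFI k (s + 1) t := by simp [pvFI, hk]
    rw [hfi]
    have := ih hks
    simp only [pvMins] at this
    rw [this]

-- A's scan equals the min of the first-occurrence indices, with the default
theorem pvFindA_eq_mins (keys : List String) (dflt : Int) :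
    ∀ (l : List String) (s : Int),
      pvFindA keys dflt (PySem.List.enumerate (l.map PySem.Str.lower) s)
        = (pvMins keys l s).getD dflt := by
  intro l
  induction l with
  | nil => intro s; simp [pvFindA, pvMins_nil, PySem.List.enumerate_nil]
  | cons x t ih =>
    intro s
    rw [List.map_cons, PySem.List.enumerate_cons]
    by_cases hmem : PySem.Str.lower x ∈ keys
    · simp [pvFindA, hmem, pvMins_cons_mem x t s keys hmem]
    · simp only [pvFindA, hmem]
      rw [ih (s + 1), pvMins_cons_not_mem x t s keys hmem]
      simp

-- B's table lookup is the first-occurrence index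
theorem pvTable_get (k : String) :
    ∀ (l : List String) (d : PySem.Dict String Int) (s : Int),
      ((PySem.List.enumerate l s).foldl
          (fun d p => d.setdefault (PySem.Str.lower p.2) p.1) d).get? k
        = (d.get? k).or (pvFI k s l) := by
  intro l
  induction l with
  | nil => intro d s; simp [PySem.List.enumerate_nil, pvFI]
  | cons x t ih =>
    intro d s
    rw [PySem.List.enumerate_cons, List.foldl_cons, ih]
    by_cases hk : PySem.Str.lower x = k
    · subst hk
      rw [PySem.Dict.get?_setdefault_self]
      rcases hd : d.get? (PySem.Str.lower x) with _ | v <;>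
        simp [pvFI, Option.or]
    · rw [PySem.Dict.get?_setdefault_of_ne _ _ (Ne.symm hk)]
      simp [pvFI, hk]

-- min? of an Int list as a foldr of pvOmin
theorem pvFoldlMinAux : ∀ (t : List Int) (x : Int),
    t.foldl min x = (match t.foldr (fun y acc => pvOmin (some y) acc) none with
      | none => x
      | some m => min x m) := by
  intro t
  induction t with
  | nil => intro x; rfl
  | cons y t' ih =>
    intro x
    simp only [List.foldl_cons, List.foldr_cons, ih (min x y)]
    rcases hr : (t'.foldr (fun y acc => pvOmin (some y) acc) none) with _ | m <;>
      simp [pvOmin, min_assoc]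

theorem pvMin?_eq_foldr (xs : List Int) :
    PySem.List.min? xs (fun y => y) = xs.foldr (fun y acc => pvOmin (some y) acc) none := by
  cases xs with
  | nil => rfl
  | cons x t =>
    rw [PySem.List.min?_id_cons, List.foldr_cons, pvFoldlMinAux t x]
    rcases hr : (t.foldr (fun y acc => pvOmin (some y) acc) none) with _ | m <;> simp [pvOmin]

theorem pvFoldrFilterMap (g : String → Option Int) : ∀ (keys : List String),
    ((keys.filterMap g).foldr (fun y acc => pvOmin (some y) acc) none)
      = keys.foldr (fun k acc => pvOmin (g k) acc) none := by
  intro keys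
  induction keys with
  | nil => rfl
  | cons k ks ih =>
    rcases hg : g k with _ | v
    · rw [List.filterMap_cons, hg, List.foldr_cons, hg, ih]; rfl
    · rw [List.filterMap_cons, hg, List.foldr_cons, List.foldr_cons, hg, ih]

-- per-component equality
theorem pvComponent (keys : List String) (dflt : Int) (l : List String) :
    PySem.List.minD (keys.filterMap (fun k =>
        ((PySem.List.enumerate l 0).foldl
          (fun d p => d.setdefault (PySem.Str.lower p.2) p.1) PySem.Dict.empty).get? k))
      (fun x => x) dflt
    = pvFindA keys dflt (PySem.List.enumerate (l.map PySem.Str.lower) 0) := by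
  have htab : ∀ k, ((PySem.List.enumerate l 0).foldl
      (fun d p => d.setdefault (PySem.Str.lower p.2) p.1) PySem.Dict.empty).get? k
        = pvFI k 0 l := by
    intro k; rw [pvTable_get k l PySem.Dict.empty 0]; simp [Option.or]
  have hfm : (keys.filterMap (fun k =>
      ((PySem.List.enumerate l 0).foldl
        (fun d p => d.setdefault (PySem.Str.lower p.2) p.1) PySem.Dict.empty).get? k))
      = keys.filterMap (fun k => pvFI k 0 l) := by
    apply List.filterMap_congr; intro k _; rw [htab]
  rw [hfm, PySem.List.minD, pvMin?_eq_foldr, pvFoldrFilterMap, pvFindA_eq_mins]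
  rfl

-- ===== VERDICT (by name: the statement is the Claim_ definition above) =====
theorem get_outcome_indices_spec : Claim_equal_get_outcome_indices := by
  intro l _
  unfold Spec_get_outcome_indices get_outcome_indices get_outcome_indices_alt
  simp only []
  rw [← pvComponent ["up", "yes", "higher", "above"] 0 l,
      ← pvComponent ["down", "no", "lower", "below"] 1 l]
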